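-- pv_equiv track=rewrite | github.com/NR55/Novel-Song-Recognition | process_1.py | compare_hash_tables
-- ===== SOURCE A (Python) =====
-- def compare_hash_tables(client_hash_table, server_hash_tables):
--     matching_counts = {}
--
--     # Iterate over each hash table in the server
--     for song_id, server_hash_table in server_hash_tables.items():
--         # Count of matched elements for each song
--         matching_count = 0
--
--         # Iterate over each element in the client hash table
--         for client_anchor, client_targets in client_hash_table.items():
--             # Check if the element is also present in the server hash table
--             if str(client_anchor) in server_hash_tables:
--                 server_targets = server_hash_tables[str(client_anchor)]
--
--                 # Compare the hash values for each target point
--                 for client_target_index, client_hash in client_targets: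
--                     for server_target_index, server_hash in server_targets:
--                         if client_target_index == server_target_index and client_hash == server_hash:
--                             matching_count += 1
--
--         matching_counts[song_id] = matching_count
--
--     return matching_counts
-- ===== SOURCE B (Python) =====
-- def compare_hash_tables(client_hash_table, server_hash_tables):
--     # The inner comparison never uses the current song's table, so the count
--     # is identical for every server song: compute it once, then map it onto
--     # every server key.
--     total = 0
--     for client_anchor, client_targets in client_hash_table.items():
--         server_targets = server_hash_tables.get(str(client_anchor))
--         if server_targets is None:
--             continue
--         counts = {}
--         for t in server_targets:
--             key = tuple(t)
--             counts[key] = counts.get(key, 0) + 1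
--         for t in client_targets:
--             total += counts.get(tuple(t), 0)
--     return {song_id: total for song_id in server_hash_tables}
-- ===== Notes on version B (the rewrite author's own statement) =====
-- stated objective: faster
-- what changed: The per-song count ignores the current song's table, so B computes it once (one pass over the client table with an occurrence-count dict per matched anchor, removing the quadratic target-by-target scan) and maps that single value onto every server key, instead of A's recomputation of the same nested loops for every server song.
import Mathlib
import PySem

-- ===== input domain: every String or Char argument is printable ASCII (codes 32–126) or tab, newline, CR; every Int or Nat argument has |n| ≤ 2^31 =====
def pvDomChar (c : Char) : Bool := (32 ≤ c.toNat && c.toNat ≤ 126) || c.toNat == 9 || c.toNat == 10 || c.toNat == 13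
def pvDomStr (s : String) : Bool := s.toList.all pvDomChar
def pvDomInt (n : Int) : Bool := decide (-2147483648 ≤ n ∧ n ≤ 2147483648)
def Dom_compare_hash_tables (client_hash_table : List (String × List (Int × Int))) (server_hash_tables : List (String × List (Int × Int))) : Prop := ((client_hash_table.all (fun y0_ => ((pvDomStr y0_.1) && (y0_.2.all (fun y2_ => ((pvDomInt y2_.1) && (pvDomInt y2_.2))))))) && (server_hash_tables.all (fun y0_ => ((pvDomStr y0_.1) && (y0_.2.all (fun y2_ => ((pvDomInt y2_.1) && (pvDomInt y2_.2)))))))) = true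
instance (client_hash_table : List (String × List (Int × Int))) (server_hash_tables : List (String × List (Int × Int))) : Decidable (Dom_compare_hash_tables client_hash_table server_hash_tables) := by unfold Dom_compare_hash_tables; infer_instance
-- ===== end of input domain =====

-- B computes the (song-independent) match count once with a per-anchor occurrence dict and
-- maps it onto every server key, instead of A's nested rescan per server song (faster).

-- shared helper: dict lookup (first match), i.e. server_hash_tables.get(k) / `k in d` + `d[k]`
def pvLookupTargets (server : List (String × List (Int × Int))) (k : String) : Option (List (Int × Int)) :=
  (server.find? (fun p => p.1 == k)).map (·.2)

-- ===== PORT A =====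
def compare_hash_tables (client_hash_table : List (String × List (Int × Int))) (server_hash_tables : List (String × List (Int × Int))) : List (String × Int) :=
  (server_hash_tables.foldl
    (fun (matching_counts : PySem.Dict String Int) song =>
      -- matching_count: nested loops over every client anchor's targets × server targets
      let matching_count : Int := client_hash_table.foldl
        (fun (m : Int) client =>
          match pvLookupTargets server_hash_tables client.1 with
          | some server_targets =>
              client.2.foldl
                (fun (m1 : Int) ct =>
                  server_targets.foldl
                    (fun (m2 : Int) st =>
                      if ct.1 == st.1 && ct.2 == st.2 then m2 + 1 else m2) m1) m
          | none => m) 0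
      matching_counts.insert song.1 matching_count)
    PySem.Dict.empty).items

-- ===== PORT B =====
def compare_hash_tables_alt (client_hash_table : List (String × List (Int × Int))) (server_hash_tables : List (String × List (Int × Int))) : List (String × Int) :=
  let total : Int := client_hash_table.foldl
    (fun (m : Int) client =>
      match pvLookupTargets server_hash_tables client.1 with
      | none => m
      | some server_targets =>
          -- counts = occurrence dict of the server targets
          let counts : PySem.Dict (Int × Int) Int :=
            server_targets.foldl (fun d t => d.insert t (d.getD t 0 + 1)) PySem.Dict.empty
          client.2.foldl (fun (m1 : Int) t => m1 + counts.getD t 0) m) 0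
  (server_hash_tables.foldl
    (fun (d : PySem.Dict String Int) song => d.insert song.1 total)
    PySem.Dict.empty).items

-- ===== PRECONDITION & SPEC =====
def Spec_compare_hash_tables (client_hash_table : List (String × List (Int × Int))) (server_hash_tables : List (String × List (Int × Int))) (out : List (String × Int)) : Prop := out = compare_hash_tables_alt client_hash_table server_hash_tables
instance (client_hash_table : List (String × List (Int × Int))) (server_hash_tables : List (String × List (Int × Int))) (out : List (String × Int)) : Decidable (Spec_compare_hash_tables client_hash_table server_hash_tables out) := by unfold Spec_compare_hash_tables; infer_instance

-- ===== CLAIM (what is proved, stated in full; the proofs are below) =====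
def Claim_equal_compare_hash_tables : Prop := ∀ (client_hash_table : List (String × List (Int × Int))) (server_hash_tables : List (String × List (Int × Int))), Dom_compare_hash_tables client_hash_table server_hash_tables → Spec_compare_hash_tables client_hash_table server_hash_tables (compare_hash_tables client_hash_table server_hash_tables)

-- ===== LEMMAS AND PROOFS =====

-- A's innermost scan over the server targets = B's occurrence-dict lookup
lemma pv_scan_eq_count (ct : Int × Int) (sts : List (Int × Int)) (m1 : Int) :
    sts.foldl (fun (m2 : Int) st => if ct.1 == st.1 && ct.2 == st.2 then m2 + 1 else m2) m1
      = m1 + (sts.foldl (fun (d : PySem.Dict (Int × Int) Int) t => d.insert t (d.getD t 0 + 1)) PySem.Dict.empty).getD ct 0 := by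
  rw [PySem.Dict.getD_foldl_insert_add_one, PySem.Dict.getD_empty]
  induction sts generalizing m1 with
  | nil => simp
  | cons a l ih =>
      rw [List.foldl_cons, ih, List.count_cons]
      by_cases h : a = ct
      · subst h
        simp only [beq_self_eq_true, Bool.and_self, if_true]
        push_cast; ring
      · have hb : (ct.1 == a.1 && ct.2 == a.2) = false := by
          by_contra hc
          have ht : (ct.1 == a.1 && ct.2 == a.2) = true := by
            revert hc; cases (ct.1 == a.1 && ct.2 == a.2) <;> simp
          obtain ⟨h1, h2⟩ := Bool.and_eq_true_iff.mp ht
          exact h (Prod.ext_iff.mpr ⟨(beq_iff_eq.mp h1).symm, (beq_iff_eq.mp h2).symm⟩)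
        simp [hb, beq_iff_eq, h]

-- the two per-anchor client folds agree
lemma pv_client_eq (server : List (String × List (Int × Int))) (c : List (String × List (Int × Int))) :
    c.foldl
        (fun (m : Int) client =>
          match pvLookupTargets server client.1 with
          | some server_targets =>
              client.2.foldl
                (fun (m1 : Int) ct =>
                  server_targets.foldl
                    (fun (m2 : Int) st =>
                      if ct.1 == st.1 && ct.2 == st.2 then m2 + 1 else m2) m1) m
          | none => m) 0
      = c.foldl
        (fun (m : Int) client =>
          match pvLookupTargets server client.1 with
          | none => m
          | some server_targets =>
              let counts : PySem.Dict (Int × Int) Int :=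
                server_targets.foldl (fun d t => d.insert t (d.getD t 0 + 1)) PySem.Dict.empty
              client.2.foldl (fun (m1 : Int) t => m1 + counts.getD t 0) m) 0 := by
  have hf : ∀ (m : Int) (client : String × List (Int × Int)),
      (match pvLookupTargets server client.1 with
        | some server_targets =>
            client.2.foldl
              (fun (m1 : Int) ct =>
                server_targets.foldl
                  (fun (m2 : Int) st =>
                    if ct.1 == st.1 && ct.2 == st.2 then m2 + 1 else m2) m1) m
        | none => m)
      = (match pvLookupTargets server client.1 with
        | none => m
        | some server_targets =>
            let counts : PySem.Dict (Int × Int) Int :=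
              server_targets.foldl (fun d t => d.insert t (d.getD t 0 + 1)) PySem.Dict.empty
            client.2.foldl (fun (m1 : Int) t => m1 + counts.getD t 0) m) := by
    intro m client
    cases h : pvLookupTargets server client.1 with
    | none => rfl
    | some sts =>
        simp only []
        apply PySem.List.foldl_congr_mem
        intro m1 ct _; exact pv_scan_eq_count ct sts m1
  apply PySem.List.foldl_congr_mem
  intro m q _; exact hf m q

-- ===== VERDICT (by name: the statement is the Claim_ definition above) =====
theorem compare_hash_tables_spec : Claim_equal_compare_hash_tables := by
  intro c s _
  unfold Spec_compare_hash_tables compare_hash_tables compare_hash_tables_alt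
  rw [pv_client_eq s c]
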